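-- pv_equiv track=rewrite | github.com/nedoletoff/networks_and_systems | main.py | poly_prod
-- ===== SOURCE A (Python) =====
-- def poly_prod(a_p: list, b_p: list) -> list:  # highest degree of the polynomial in right
--     a_p = a_p.copy()
--     b_p = b_p.copy()
--     # highest degree of the polynomial in left
--     a_p = a_p[::-1]
--     b_p = b_p[::-1]
--     res = [0] * (len(a_p) + len(b_p) - 1)
--     for i in range(len(a_p)):
--         for j in range(len(b_p)):
--             res[i + j] += (a_p[i] * b_p[j])
--     res = res[::-1]
--     # highest degree of the polynomial in right
--     return [x % 2 for x in res]
-- ===== SOURCE B (Python) =====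
-- def poly_prod(a_p: list, b_p: list) -> list:
--     # Pack coefficient parities into one big integer and do a carry-less
--     # (XOR) Horner multiplication; then unpack the bits of the product.
--     x = 0
--     for c in a_p:
--         x = (x << 1) | (c & 1)
--     acc = 0
--     for c in b_p:
--         acc = (acc << 1) ^ (x if c & 1 else 0)
--     out_len = len(a_p) + len(b_p) - 1
--     return [(acc >> (out_len - 1 - k)) & 1 for k in range(out_len)]
-- ===== Notes on version B (the rewrite author's own statement) =====
-- stated objective: faster
-- what changed: A's O(n*m) nested Python loops scattering full integer products into a mutable list are replaced by packing the coefficient parities of a_p into one big integer and doing a carry-less (XOR) Horner multiplication over b_p, then unpacking the product's bits; correct because only the mod-2 residue of each convolution coefficient is returned.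
import Mathlib
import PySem

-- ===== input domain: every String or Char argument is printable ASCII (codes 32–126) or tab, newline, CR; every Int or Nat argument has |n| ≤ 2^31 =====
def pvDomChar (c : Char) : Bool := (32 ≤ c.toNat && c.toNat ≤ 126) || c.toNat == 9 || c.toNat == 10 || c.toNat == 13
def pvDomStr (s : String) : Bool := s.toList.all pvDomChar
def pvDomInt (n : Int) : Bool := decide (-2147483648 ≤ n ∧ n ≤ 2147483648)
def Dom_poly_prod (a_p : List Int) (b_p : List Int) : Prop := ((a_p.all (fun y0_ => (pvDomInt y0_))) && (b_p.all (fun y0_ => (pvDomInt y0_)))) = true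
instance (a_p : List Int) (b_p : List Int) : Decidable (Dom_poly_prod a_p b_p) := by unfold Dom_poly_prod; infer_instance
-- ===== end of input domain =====

-- B replaces A's quadratic nested scatter loop by packing the coefficient parities
-- of a_p into one big integer and doing a carry-less (XOR) Horner multiplication
-- over b_p, then unpacking the product's bits (objective: faster).

-- ===== PORT A =====
-- xs[::-1] is List.reverse (exact); res[i+j] reads/writes are always in range
-- (i + j ≤ len(a)+len(b)-2 < len(res)), so getD 0 / List.set are exact here;
-- [0]*(len(a)+len(b)-1): Nat subtraction matches Python ([0]*(-1) = [] = replicate 0).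
def poly_prod (a_p : List Int) (b_p : List Int) : List Int :=
  let a := a_p.reverse
  let b := b_p.reverse
  let res0 : List Int := List.replicate (a.length + b.length - 1) 0
  let res := (List.range a.length).foldl (fun r i =>
      (List.range b.length).foldl (fun r j =>
        r.set (i + j) (r.getD (i + j) 0 + a.getD i 0 * b.getD j 0)) r) res0
  res.reverse.map (fun x => PySem.Int.mod x 2)

-- ===== PORT B =====
-- Python << / >> / & / | / ^ on ints are Lean's <<< / >>> (Nat shift amounts;
-- both shift counts here are nonnegative) and PySem.Int.band/bor/bxor;
-- range(len(a)+len(b)-1): Nat subtraction matches Python (range(-1) = []).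
def poly_prod_alt (a_p : List Int) (b_p : List Int) : List Int :=
  let x := a_p.foldl (fun x c => PySem.Int.bor (x <<< (1:Nat)) (PySem.Int.band c 1)) 0
  let acc := b_p.foldl (fun acc c =>
      PySem.Int.bxor (acc <<< (1:Nat)) (if PySem.Int.band c 1 ≠ 0 then x else 0)) 0
  let L := a_p.length + b_p.length - 1
  (List.range L).map (fun k => PySem.Int.band (acc >>> (L - 1 - k)) 1)

-- ===== PRECONDITION & SPEC =====
def Spec_poly_prod (a_p : List Int) (b_p : List Int) (out : List Int) : Prop := out = poly_prod_alt a_p b_p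
instance (a_p : List Int) (b_p : List Int) (out : List Int) : Decidable (Spec_poly_prod a_p b_p out) := by unfold Spec_poly_prod; infer_instance

-- ===== CLAIM (what is proved, stated in full; the proofs are below) =====
def Claim_equal_poly_prod : Prop := ∀ (a_p : List Int) (b_p : List Int), Dom_poly_prod a_p b_p → Spec_poly_prod a_p b_p (poly_prod a_p b_p)

-- ===== LEMMAS AND PROOFS =====

def pvBit (c : Int) : Nat := (PySem.Int.mod c 2).toNat
def pvPack (l : List Int) : Nat := l.foldl (fun x c => (x <<< 1) ||| pvBit c) 0

lemma pvBit_lt_two (c : Int) : pvBit c < 2 := by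
  unfold pvBit
  have h1 := PySem.Int.mod_lt c (b := 2) (by norm_num)
  have h2 := PySem.Int.mod_nonneg c (b := 2) (by norm_num)
  omega

lemma testBit_of_lt_two (b p : Nat) (h : b < 2) : b.testBit (p+1) = false := by
  apply Nat.testBit_lt_two_pow
  have h1 : 0 < 2^p := Nat.two_pow_pos p
  have h2 : (2:Nat)^(p+1) = 2^p * 2 := pow_succ 2 p
  omega

lemma pack_testBit (l : List Int) (p : Nat) :
    (pvPack l).testBit p = decide (pvBit (l.reverse.getD p 0) = 1) := by
  induction l using List.reverseRecOn generalizing p with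
  | nil => simp [pvPack, pvBit, PySem.Int.mod]
  | append_singleton l c ih =>
    have hstep : pvPack (l ++ [c]) = (pvPack l <<< 1) ||| pvBit c := by simp [pvPack]
    have hlt := pvBit_lt_two c
    cases p with
    | zero =>
      rw [hstep]
      simp only [Nat.testBit_or, Nat.testBit_shiftLeft, List.reverse_append,
        List.reverse_singleton, List.singleton_append, List.getD_cons_zero]
      simp only [Nat.testBit_zero]
      simp
      omega
    | succ p =>
      rw [hstep]
      simp [Nat.testBit_or, Nat.testBit_shiftLeft, testBit_of_lt_two _ _ hlt, ih]

def pvAcc (x : Nat) (l : List Int) : Nat :=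
  l.foldl (fun acc c => (acc <<< 1) ^^^ (if pvBit c = 1 then x else 0)) 0

def pvConvBit (x : Nat) : List Int → Nat → Bool
  | [], _ => false
  | c :: rs, p =>
      ((pvBit c = 1 : Bool) && x.testBit p).xor
        (match p with | 0 => false | p + 1 => pvConvBit x rs p)

lemma acc_testBit (x : Nat) (l : List Int) (p : Nat) :
    (pvAcc x l).testBit p = pvConvBit x l.reverse p := by
  induction l using List.reverseRecOn generalizing p with
  | nil => simp [pvAcc, pvConvBit]
  | append_singleton l c ih =>
    have hstep : pvAcc x (l ++ [c]) = (pvAcc x l <<< 1) ^^^ (if pvBit c = 1 then x else 0) := by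
      simp [pvAcc]
    rw [hstep, List.reverse_append]
    cases p with
    | zero =>
      simp only [Nat.testBit_xor, Nat.testBit_shiftLeft]
      by_cases h : pvBit c = 1 <;>
        simp [h, pvConvBit]
    | succ p =>
      simp only [Nat.testBit_xor, Nat.testBit_shiftLeft]
      by_cases h : pvBit c = 1 <;>
        simp [h, pvConvBit, ih, Bool.xor_comm]

def pvSB (ra rb : List Int) (t : Nat) : Nat :=
  ∑ i ∈ Finset.range ra.length, ∑ j ∈ Finset.range rb.length,
    if i + j = t then pvBit (ra.getD i 0) * pvBit (rb.getD j 0) else 0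

lemma pvBit_zero : pvBit 0 = 0 := by decide

lemma SB_nil (ra : List Int) (t : Nat) : pvSB ra [] t = 0 := by
  simp [pvSB]

lemma SB_cons (ra : List Int) (c : Int) (rs : List Int) (t : Nat) :
    pvSB ra (c :: rs) t =
      pvBit (ra.getD t 0) * pvBit c + (match t with | 0 => 0 | t + 1 => pvSB ra rs t) := by
  unfold pvSB
  have hlen : (c :: rs).length = rs.length + 1 := rfl
  rw [hlen]
  have hsplit : ∀ i, ∑ j ∈ Finset.range (rs.length + 1),
      (if i + j = t then pvBit (ra.getD i 0) * pvBit ((c :: rs).getD j 0) else 0)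
      = (∑ j ∈ Finset.range rs.length,
          (if i + (j+1) = t then pvBit (ra.getD i 0) * pvBit (rs.getD j 0) else 0))
        + (if i = t then pvBit (ra.getD i 0) * pvBit c else 0) := by
    intro i
    rw [Finset.sum_range_succ']
    simp
  rw [Finset.sum_congr rfl (fun i _ => hsplit i), Finset.sum_add_distrib]
  have h2 : (∑ i ∈ Finset.range ra.length, if i = t then pvBit (ra.getD i 0) * pvBit c else 0)
      = pvBit (ra.getD t 0) * pvBit c := by
    rw [Finset.sum_ite_eq' (Finset.range ra.length) t]
    by_cases h : t < ra.length
    · simp [h]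
    · simp [h]
      have : ra.getD t 0 = 0 := by
        rw [List.getD_eq_getElem?_getD]
        simp [List.getElem?_eq_none (by omega : ra.length ≤ t)]
      simp [pvBit_zero]
  cases t with
  | zero =>
    simp only [h2]
    have : ∀ i ∈ Finset.range ra.length, (∑ j ∈ Finset.range rs.length,
        if i + (j+1) = 0 then pvBit (ra.getD i 0) * pvBit (rs.getD j 0) else 0) = 0 := by
      intro i _; apply Finset.sum_eq_zero; intro j _; simp
    rw [Finset.sum_congr rfl this]
    simp
  | succ t =>
    simp only [h2]
    have : ∀ i ∈ Finset.range ra.length, (∑ j ∈ Finset.range rs.length,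
        if i + (j+1) = t + 1 then pvBit (ra.getD i 0) * pvBit (rs.getD j 0) else 0)
        = (∑ j ∈ Finset.range rs.length,
        if i + j = t then pvBit (ra.getD i 0) * pvBit (rs.getD j 0) else 0) := by
      intro i _
      apply Finset.sum_congr rfl
      intro j _
      congr 1
      simp
      omega
    rw [Finset.sum_congr rfl this]
    omega

lemma parity_step (u v w : Nat) (hu : u < 2) (hv : v < 2) :
    ((decide (u = 1) && decide (v = 1)).xor (decide (w % 2 = 1)))
      = decide ((v * u + w) % 2 = 1) := by
  interval_cases u <;> interval_cases v <;> by_cases hw : w % 2 = 1 <;> simp [hw] <;> omega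

lemma convBit_eq_SB (ra : List Int) (x : Nat)
    (hX : ∀ q, x.testBit q = decide (pvBit (ra.getD q 0) = 1))
    (rb : List Int) (p : Nat) :
    pvConvBit x rb p = decide (pvSB ra rb p % 2 = 1) := by
  induction rb generalizing p with
  | nil => simp [pvConvBit, SB_nil]
  | cons c rs ih =>
    rw [SB_cons]
    have hu := pvBit_lt_two c
    cases p with
    | zero =>
      have hv := pvBit_lt_two (ra.getD 0 0)
      have h1 : pvConvBit x (c :: rs) 0
          = ((decide (pvBit c = 1) && decide (pvBit (ra.getD 0 0) = 1)).xor
              (decide ((0:Nat) % 2 = 1))) := by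
        simp [pvConvBit, hX]
      rw [h1, parity_step _ _ _ hu hv]
    | succ p =>
      have hv := pvBit_lt_two (ra.getD (p+1) 0)
      have h1 : pvConvBit x (c :: rs) (p+1)
          = ((decide (pvBit c = 1) && decide (pvBit (ra.getD (p+1) 0) = 1)).xor
              (decide (pvSB ra rs p % 2 = 1))) := by
        simp [pvConvBit, hX, ih]
      rw [h1, parity_step _ _ _ hu hv]

def pvSI (ra rb : List Int) (t : Nat) : Int :=
  ∑ i ∈ Finset.range ra.length, ∑ j ∈ Finset.range rb.length,
    if i + j = t then ra.getD i 0 * rb.getD j 0 else 0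

lemma getD_set (r : List Int) (q t : Nat) (v : Int) :
    (r.set q v).getD t 0 = if q = t ∧ q < r.length then v else r.getD t 0 := by
  rw [List.getD_eq_getElem?_getD, List.getD_eq_getElem?_getD, List.getElem?_set]
  by_cases h1 : q = t
  · subst h1; by_cases h2 : q < r.length <;> simp [h2]
  · simp [h1]

lemma inner_fold (ra rb : List Int) (i : Nat) (hi : i < ra.length) :
    ∀ (m : Nat) (r : List Int), m ≤ rb.length → r.length = ra.length + rb.length - 1 →
    (((List.range m).foldl (fun r j =>
        r.set (i + j) (r.getD (i + j) 0 + ra.getD i 0 * rb.getD j 0)) r).length = r.length ∧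
     ∀ t, ((List.range m).foldl (fun r j =>
        r.set (i + j) (r.getD (i + j) 0 + ra.getD i 0 * rb.getD j 0)) r).getD t 0
        = r.getD t 0 + ∑ j ∈ Finset.range m, (if i + j = t then ra.getD i 0 * rb.getD j 0 else 0)) := by
  intro m
  induction m with
  | zero => intro r _ _; simp
  | succ m ih =>
    intro r hm hr
    rw [List.range_succ, List.foldl_append]
    obtain ⟨ihlen, ihval⟩ := ih r (by omega) hr
    simp only [List.foldl_cons, List.foldl_nil]
    constructor
    · rw [List.length_set, ihlen]
    · intro t
      rw [getD_set, ihlen, hr, Finset.sum_range_succ, ihval t, ihval (i + m)]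
      by_cases h : i + m = t
      · subst h
        rw [if_pos ⟨rfl, by omega⟩, if_pos rfl]
        ring
      · rw [if_neg (by tauto), if_neg h]
        ring

lemma outer_fold (ra rb : List Int) :
    ∀ (n : Nat) (r : List Int), n ≤ ra.length → r.length = ra.length + rb.length - 1 →
    (((List.range n).foldl (fun r i => (List.range rb.length).foldl (fun r j =>
        r.set (i + j) (r.getD (i + j) 0 + ra.getD i 0 * rb.getD j 0)) r) r).length = r.length ∧
     ∀ t, ((List.range n).foldl (fun r i => (List.range rb.length).foldl (fun r j =>
        r.set (i + j) (r.getD (i + j) 0 + ra.getD i 0 * rb.getD j 0)) r) r).getD t 0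
        = r.getD t 0 + ∑ i ∈ Finset.range n, ∑ j ∈ Finset.range rb.length,
            (if i + j = t then ra.getD i 0 * rb.getD j 0 else 0)) := by
  intro n
  induction n with
  | zero => intro r _ _; simp
  | succ n ih =>
    intro r hn hr
    rw [List.range_succ, List.foldl_append]
    obtain ⟨ihlen, ihval⟩ := ih r (by omega) hr
    simp only [List.foldl_cons, List.foldl_nil]
    obtain ⟨slen, sval⟩ := inner_fold ra rb n (by omega) rb.length _ (le_refl _)
      (by rw [ihlen, hr])
    constructor
    · rw [slen, ihlen]
    · intro t
      rw [sval t, ihval t, Finset.sum_range_succ]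
      ring

lemma scatter_getD (ra rb : List Int) (t : Nat) :
    ((List.range ra.length).foldl (fun r i =>
      (List.range rb.length).foldl (fun r j =>
        r.set (i + j) (r.getD (i + j) 0 + ra.getD i 0 * rb.getD j 0)) r)
      (List.replicate (ra.length + rb.length - 1) (0 : Int))).getD t 0
    = pvSI ra rb t := by
  obtain ⟨_, hval⟩ := outer_fold ra rb ra.length
    (List.replicate (ra.length + rb.length - 1) (0 : Int)) (le_refl _) (by simp)
  rw [hval t, pvSI]
  simp

lemma scatter_length (ra rb : List Int) :
    ((List.range ra.length).foldl (fun r i =>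
      (List.range rb.length).foldl (fun r j =>
        r.set (i + j) (r.getD (i + j) 0 + ra.getD i 0 * rb.getD j 0)) r)
      (List.replicate (ra.length + rb.length - 1) (0 : Int))).length
    = ra.length + rb.length - 1 := by
  obtain ⟨hlen, _⟩ := outer_fold ra rb ra.length
    (List.replicate (ra.length + rb.length - 1) (0 : Int)) (le_refl _) (by simp)
  rw [hlen]; simp

lemma natCast_shiftLeft (s k : Nat) : ((s:Int) <<< k) = ((s <<< k : Nat) : Int) := rfl
lemma natCast_shiftRight (s k : Nat) : ((s:Int) >>> k) = ((s >>> k : Nat) : Int) := rfl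

lemma bit_cast (c : Int) : ((pvBit c : Nat) : Int) = PySem.Int.mod c 2 := by
  unfold pvBit
  exact Int.toNat_of_nonneg (PySem.Int.mod_nonneg c (by norm_num))

lemma band_one_eq_bit (c : Int) : PySem.Int.band c 1 = ((pvBit c : Nat) : Int) := by
  rw [PySem.Int.band_one, bit_cast]

lemma x_bridge (l : List Int) :
    l.foldl (fun x c => PySem.Int.bor (x <<< (1:Nat)) (PySem.Int.band c 1)) 0 = ((pvPack l : Nat) : Int) := by
  have key : ∀ (l : List Int) (s : Nat),
      l.foldl (fun x c => PySem.Int.bor (x <<< (1:Nat)) (PySem.Int.band c 1)) ((s : Nat) : Int)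
      = ((l.foldl (fun x c => (x <<< 1) ||| pvBit c) s : Nat) : Int) := by
    intro l
    induction l with
    | nil => intro s; rfl
    | cons c rs ih =>
      intro s
      simp only [List.foldl_cons]
      rw [band_one_eq_bit, natCast_shiftLeft, PySem.Int.bor_natCast, ih]
  exact_mod_cast key l 0

lemma band_one_ne_zero_iff (c : Int) : (PySem.Int.band c 1 ≠ 0) ↔ pvBit c = 1 := by
  rw [PySem.Int.band_one]
  unfold pvBit
  have h1 := PySem.Int.mod_lt c (b := 2) (by norm_num)
  have h2 := PySem.Int.mod_nonneg c (b := 2) (by norm_num)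
  omega

lemma acc_bridge (X : Nat) (l : List Int) :
    l.foldl (fun acc c => PySem.Int.bxor (acc <<< (1:Nat))
        (if PySem.Int.band c 1 ≠ 0 then ((X : Nat) : Int) else 0)) 0
    = ((pvAcc X l : Nat) : Int) := by
  have key : ∀ (l : List Int) (s : Nat),
      l.foldl (fun acc c => PySem.Int.bxor (acc <<< (1:Nat))
        (if PySem.Int.band c 1 ≠ 0 then ((X : Nat) : Int) else 0)) ((s : Nat) : Int)
      = ((l.foldl (fun acc c => (acc <<< 1) ^^^ (if pvBit c = 1 then X else 0)) s : Nat) : Int) := by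
    intro l
    induction l with
    | nil => intro s; rfl
    | cons c rs ih =>
      intro s
      simp only [List.foldl_cons]
      have hi : (if PySem.Int.band c 1 ≠ 0 then ((X : Nat) : Int) else 0)
          = (((if pvBit c = 1 then X else 0 : Nat) : Nat) : Int) := by
        by_cases h : pvBit c = 1
        · rw [if_pos ((band_one_ne_zero_iff c).mpr h), if_pos h]
        · rw [if_neg (fun hc => h ((band_one_ne_zero_iff c).mp hc)), if_neg h]; rfl
      rw [hi, natCast_shiftLeft, PySem.Int.bxor_natCast, ih]
  simpa [pvAcc] using key l 0

lemma extract_bit (u s : Nat) :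
    PySem.Int.band (((u : Nat) : Int) >>> s) 1 = ((if u.testBit s then (1:Nat) else 0 : Nat) : Int) := by
  rw [natCast_shiftRight]
  have h1 : (1 : Int) = ((1 : Nat) : Int) := rfl
  rw [h1, PySem.Int.band_natCast]
  congr 1
  rw [Nat.and_one_is_mod, Nat.testBit_eq_decide_div_mod_eq, Nat.shiftRight_eq_div_pow]
  by_cases h : u / 2^s % 2 = 1 <;> simp [h] <;> omega

lemma term_mod (c d : Int) : (c * d) % 2 = (((pvBit c : Nat) : Int) * ((pvBit d : Nat) : Int)) % 2 := by
  rw [bit_cast, bit_cast, PySem.Int.mod_eq_emod_of_pos (a := c) (by norm_num),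
    PySem.Int.mod_eq_emod_of_pos (a := d) (by norm_num), ← Int.mul_emod]

lemma SI_mod_two (ra rb : List Int) (t : Nat) :
    PySem.Int.mod (pvSI ra rb t) 2 = ((pvSB ra rb t % 2 : Nat) : Int) := by
  rw [PySem.Int.mod_eq_emod_of_pos (by norm_num)]
  have hcast : ((pvSB ra rb t : Nat) : Int)
      = ∑ i ∈ Finset.range ra.length, ∑ j ∈ Finset.range rb.length,
          (if i + j = t then ((pvBit (ra.getD i 0) : Nat) : Int) * ((pvBit (rb.getD j 0) : Nat) : Int) else 0) := by
    unfold pvSB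
    push_cast
    rfl
  have hmod : pvSI ra rb t % 2 = ((pvSB ra rb t : Nat) : Int) % 2 := by
    rw [hcast]
    unfold pvSI
    rw [Finset.sum_int_mod, Finset.sum_int_mod
      (f := fun i => ∑ j ∈ Finset.range rb.length,
        (if i + j = t then ((pvBit (ra.getD i 0) : Nat) : Int) * ((pvBit (rb.getD j 0) : Nat) : Int) else 0))]
    congr 1
    apply Finset.sum_congr rfl
    intro i _
    rw [Finset.sum_int_mod, Finset.sum_int_mod
      (f := fun j => (if i + j = t then ((pvBit (ra.getD i 0) : Nat) : Int) * ((pvBit (rb.getD j 0) : Nat) : Int) else 0))]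
    congr 1
    apply Finset.sum_congr rfl
    intro j _
    by_cases h : i + j = t
    · rw [if_pos h, if_pos h, term_mod]
    · rw [if_neg h, if_neg h]
  rw [hmod]
  push_cast
  rfl

lemma A_char (ra rb : List Int) :
    ((List.range ra.length).foldl (fun r i =>
      (List.range rb.length).foldl (fun r j =>
        r.set (i + j) (r.getD (i + j) 0 + ra.getD i 0 * rb.getD j 0)) r)
      (List.replicate (ra.length + rb.length - 1) (0 : Int))).reverse.map
        (fun x => PySem.Int.mod x 2)
    = (List.range (ra.length + rb.length - 1)).map
        (fun k => ((pvSB ra rb (ra.length + rb.length - 1 - 1 - k) % 2 : Nat) : Int)) := by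
  apply List.ext_getElem
  · simp only [List.length_map, List.length_reverse, List.length_range]
    exact scatter_length ra rb
  · intro k h1 h2
    simp only [List.getElem_map, List.getElem_reverse, List.getElem_range, scatter_length]
    rw [← List.getD_eq_getElem _ 0 (by
      rw [scatter_length]
      simp only [List.length_map, List.length_reverse, scatter_length] at h1
      omega)]
    rw [scatter_getD, SI_mod_two]

lemma mod_two_eq_ite (w : Nat) :
    ((if decide (w % 2 = 1) then (1:Nat) else 0 : Nat) : Int) = ((w % 2 : Nat) : Int) := by
  have := Nat.mod_lt w (y := 2) (by norm_num)
  by_cases h : w % 2 = 1 <;> simp [h] <;> omega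

lemma B_char (a_p b_p : List Int) :
    poly_prod_alt a_p b_p = (List.range (a_p.length + b_p.length - 1)).map
      (fun k => ((pvSB a_p.reverse b_p.reverse ((a_p.length + b_p.length - 1) - 1 - k) % 2 : Nat) : Int)) := by
  simp only [poly_prod_alt]
  rw [x_bridge, acc_bridge]
  apply List.map_congr_left
  intro k _
  rw [extract_bit, acc_testBit,
    convBit_eq_SB a_p.reverse (pvPack a_p) (pack_testBit a_p), mod_two_eq_ite]

lemma poly_prod_eq_alt (a_p b_p : List Int) : poly_prod a_p b_p = poly_prod_alt a_p b_p := by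
  simp only [poly_prod]
  rw [A_char, B_char]
  simp only [List.length_reverse]

-- ===== VERDICT (by name: the statement is the Claim_ definition above) =====
theorem poly_prod_spec : Claim_equal_poly_prod := by
  intro a_p b_p _
  unfold Spec_poly_prod
  exact poly_prod_eq_alt a_p b_p
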